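-- pv_equiv track=rewrite | github.com/Nico7777777/NIST-security-validator | serial.py | found_pattern
-- ===== SOURCE A (Python) =====
-- def found_pattern(v, m):
--     n = len(v)
--     pattern_dictionary = {}
--     # Take all patterns of length m and add them to a dictionary
--     for i in range(n - m + 1):
--         pattern = tuple(v[i:i + m])
--         if pattern in pattern_dictionary:
--             pattern_dictionary[pattern] += 1
--             # Increase the frequency of the pattern in the dictionary, i.e., increase the key's value.
--         else:
--             pattern_dictionary[pattern] = 1
--
--     # The keys are the patterns, the values are the counts associated with the patterns.
--     # .items() generates the pair of iterators (key, value)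
--     found_patterns = {pattern: count for pattern, count in pattern_dictionary.items() if count > 1}
--     return found_patterns
-- ===== SOURCE B (Python) =====
-- def found_pattern(v, m):
--     n = len(v)
--     ws = [tuple(v[i:i + m]) for i in range(n - m + 1)]
--     # sort-then-scan: run lengths of the sorted window list give the counts
--     counts = {}
--     run_val, run_len = None, 0
--     for w in sorted(ws):
--         if run_len > 0 and w == run_val:
--             run_len += 1
--         else:
--             if run_len > 1:
--                 counts[run_val] = run_len
--             run_val, run_len = w, 1
--     if run_len > 1:
--         counts[run_val] = run_len
--     # rebuild first-occurrence order
--     out = {}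
--     for w in ws:
--         if w in counts and w not in out:
--             out[w] = counts[w]
--     return out
-- ===== Notes on version B (the rewrite author's own statement) =====
-- stated objective: alternative
-- what changed: Replaces A's hash-dictionary counting loop plus a dict-comprehension filter by a sort-then-scan algorithm: the window list is sorted, run lengths of the sorted list give the multiplicities, and a final pass over the original windows rebuilds the first-occurrence order of the repeated ones.
import Mathlib
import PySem

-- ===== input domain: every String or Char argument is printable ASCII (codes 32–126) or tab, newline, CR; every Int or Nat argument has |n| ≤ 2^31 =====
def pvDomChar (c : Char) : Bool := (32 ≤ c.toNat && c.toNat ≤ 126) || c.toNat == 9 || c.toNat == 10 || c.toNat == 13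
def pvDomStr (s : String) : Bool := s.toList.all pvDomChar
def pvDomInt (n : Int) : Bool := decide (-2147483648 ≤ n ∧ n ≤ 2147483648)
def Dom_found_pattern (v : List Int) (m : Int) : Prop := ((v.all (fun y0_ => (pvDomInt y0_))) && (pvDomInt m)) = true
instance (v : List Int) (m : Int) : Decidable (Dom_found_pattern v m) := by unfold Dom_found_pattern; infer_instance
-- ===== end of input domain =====

-- B replaces A's dict-of-window-counts by sort-then-scan (run lengths of the sorted window list,
-- then a pass rebuilding first-occurrence order): a different algorithm of similar cost.

-- ===== PORT A =====
def found_pattern (v : List Int) (m : Int) : List (List Int × Int) :=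
  let n : Int := v.length
  let d : PySem.Dict (List Int) Int :=
    (PySem.List.pyRange 0 (n - m + 1) 1).foldl
      (fun d i =>
        let pattern := PySem.List.slice v (some i) (some (i + m))
        if d.contains pattern then d.insert pattern (d.getD pattern 0 + 1)
        else d.insert pattern 1)
      PySem.Dict.empty
  (PySem.Dict.ofList (d.items.filter (fun p => 1 < p.2))).items

-- ===== PORT B =====
-- B: sort-then-scan — run lengths of the sorted window list give the counts, then first-occurrence order is rebuilt
def found_pattern_alt (v : List Int) (m : Int) : List (List Int × Int) :=
  let n : Int := v.length
  let ws : List (List Int) :=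
    (PySem.List.pyRange 0 (n - m + 1) 1).map (fun i => PySem.List.slice v (some i) (some (i + m)))
  let st :=
    (ws.mergeSort (fun a b => decide (a ≤ b))).foldl
      (fun (st : PySem.Dict (List Int) Int × Option (List Int) × Int) w =>
        let (counts, runVal, runLen) := st
        if 0 < runLen ∧ some w = runVal then (counts, runVal, runLen + 1)
        else ((if 1 < runLen then counts.insert (runVal.getD []) runLen else counts), some w, 1))
      (PySem.Dict.empty, none, 0)
  let counts := if 1 < st.2.2 then st.1.insert (st.2.1.getD []) st.2.2 else st.1
  let out : PySem.Dict (List Int) Int :=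
    ws.foldl
      (fun out w =>
        if counts.contains w ∧ ¬ out.contains w then out.insert w (counts.getD w 0) else out)
      PySem.Dict.empty
  out.items

-- ===== PRECONDITION & SPEC =====
def Spec_found_pattern (v : List Int) (m : Int) (out : List (List Int × Int)) : Prop := out = found_pattern_alt v m
instance (v : List Int) (m : Int) (out : List (List Int × Int)) : Decidable (Spec_found_pattern v m out) := by unfold Spec_found_pattern; infer_instance

-- ===== CLAIM (what is proved, stated in full; the proofs are below) =====
def Claim_equal_found_pattern : Prop := ∀ (v : List Int) (m : Int), Dom_found_pattern v m → Spec_found_pattern v m (found_pattern v m)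

-- ===== LEMMAS AND PROOFS =====

-- the window list both ports build
def pvWin (v : List Int) (m : Int) : List (List Int) :=
  (PySem.List.pyRange 0 ((v.length : Int) - m + 1) 1).map
    (fun i => PySem.List.slice v (some i) (some (i + m)))

-- B's run-length fold step and final flush
def pvStep (st : PySem.Dict (List Int) Int × Option (List Int) × Int) (w : List Int) :
    PySem.Dict (List Int) Int × Option (List Int) × Int :=
  let (counts, runVal, runLen) := st
  if 0 < runLen ∧ some w = runVal then (counts, runVal, runLen + 1)
  else ((if 1 < runLen then counts.insert (runVal.getD []) runLen else counts), some w, 1)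

def pvFlush (st : PySem.Dict (List Int) Int × Option (List Int) × Int) :
    PySem.Dict (List Int) Int :=
  if 1 < st.2.2 then st.1.insert (st.2.1.getD []) st.2.2 else st.1

def pvCounts (v : List Int) (m : Int) : PySem.Dict (List Int) Int :=
  pvFlush (((pvWin v m).mergeSort (fun a b => decide (a ≤ b))).foldl pvStep
    (PySem.Dict.empty, none, 0))

def pvOut (c : PySem.Dict (List Int) Int) (l : List (List Int)) : PySem.Dict (List Int) Int :=
  l.foldl
    (fun out w => if c.contains w ∧ ¬ out.contains w then out.insert w (c.getD w 0) else out)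
    PySem.Dict.empty

lemma alt_eq (v : List Int) (m : Int) :
    found_pattern_alt v m = (pvOut (pvCounts v m) (pvWin v m)).items := rfl

lemma items_ofList_of_nodup {κ ν : Type} [BEq κ] [LawfulBEq κ] (l : List (κ × ν))
    (h : (l.map Prod.fst).Nodup) : (PySem.Dict.ofList l).items = l := by
  show (PySem.Dict.empty.update l).items = l
  rw [show (PySem.Dict.update (PySem.Dict.empty : PySem.Dict κ ν) l) =
      l.foldl (fun d a => d.insert (Prod.fst a) (Prod.snd a)) PySem.Dict.empty from rfl]
  rw [PySem.Dict.items_foldl_insert_fresh l Prod.fst Prod.snd _ (by simp) h]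
  simp [PySem.Dict.empty]

-- A's result characterised: distinct windows in first-occurrence order, with their counts, filtered
lemma a_char (v : List Int) (m : Int) :
    found_pattern v m =
      ((PySem.Set.ofList (pvWin v m)).filter
          (fun w => decide (1 < ((pvWin v m).count w : Int)))).map
        (fun w => (w, ((pvWin v m).count w : Int))) := by
  have hstep : (fun (d : PySem.Dict (List Int) Int) (w : List Int) =>
      if d.contains w then d.insert w (d.getD w 0 + 1) else d.insert w 1)
      = fun d w => d.insert w (d.getD w 0 + 1) := by
    funext d w
    by_cases h : d.contains w
    · simp [h]
    · simp only [Bool.not_eq_true] at h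
      rw [if_neg (by simp [h]), PySem.Dict.getD_of_not_contains _ _ h]
      norm_num
  have hfoldA : ∀ (l : List Int) (f : Int → List Int),
      l.foldl (fun d i => if d.contains (f i) then d.insert (f i) (d.getD (f i) 0 + 1)
        else d.insert (f i) 1) PySem.Dict.empty = PySem.Dict.counter (l.map f) := by
    intro l f
    rw [← List.foldl_map (f := f) (g := fun (d : PySem.Dict (List Int) Int) (w : List Int) =>
      if d.contains w then d.insert w (d.getD w 0 + 1) else d.insert w 1)]
    rw [hstep, PySem.Dict.foldl_insert_getD_add_one_eq_counter]
  have h1 : found_pattern v m =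
      (PySem.Dict.ofList (((PySem.Dict.counter (pvWin v m)).items).filter
        (fun p => decide (1 < p.2)))).items := by
    simp only [found_pattern, pvWin]
    rw [hfoldA]
  rw [h1, PySem.Dict.items_counter, List.filter_map,
    items_ofList_of_nodup _ (by
      simp only [List.map_map, Function.comp_def]
      simpa using ((PySem.Set.nodup_ofList (pvWin v m)).filter _))]
  rfl
-- the run-length fold on a sorted chain computes every multiplicity > 1
lemma runloop (l : List (List Int)) (c : PySem.Dict (List Int) Int) (a : List Int) (k : Int)
    (hs : l.Pairwise (· ≤ ·)) (ha : ∀ x ∈ l, a ≤ x) (hk : 1 ≤ k)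
    (hca : c.contains a = false) (hcl : ∀ x ∈ l, c.contains x = false) (w : List Int) :
    (pvFlush (l.foldl pvStep (c, some a, k))).get? w =
      if w = a then (if 1 < k + (l.count a : Int) then some (k + (l.count a : Int)) else none)
      else if 1 < (l.count w : Int) then some ((l.count w : Int)) else c.get? w := by
  induction l generalizing c a k with
  | nil =>
    simp only [List.foldl_nil, List.count_nil, Nat.cast_zero, add_zero, pvFlush, Option.getD_some]
    rcases eq_or_ne w a with rfl | hwa
    · by_cases h1 : (1 : Int) < k
      · rw [if_pos h1, if_pos rfl, if_pos h1, PySem.Dict.get?_insert_self]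
      · rw [if_neg h1, if_pos rfl, if_neg h1]
        exact (PySem.Dict.get?_eq_none_iff_contains _ _).mpr hca
    · rw [if_neg hwa, if_neg (by norm_num : ¬ (1 : Int) < 0)]
      by_cases h1 : (1 : Int) < k
      · rw [if_pos h1, PySem.Dict.get?_insert_of_ne _ _ hwa]
      · rw [if_neg h1]
  | cons x xs ih =>
    rcases List.pairwise_cons.mp hs with ⟨hx1, hs'⟩
    have hax : a ≤ x := ha x (List.mem_cons_self)
    rw [List.foldl_cons]
    by_cases hxa : x = a
    · subst hxa
      rw [show pvStep (c, some x, k) x = (c, some x, k + 1) from by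
        simp only [pvStep, Option.getD_some]; rw [if_pos ⟨by omega, trivial⟩]]
      rw [ih c x (k + 1) hs' hx1 (by omega) hca
        (fun y hy => hcl y (List.mem_cons_of_mem _ hy))]
      rcases eq_or_ne w x with rfl | hw
      · rw [if_pos rfl, if_pos rfl, List.count_cons_self]
        push_cast
        split_ifs <;> first | rfl | (congr 1; omega)
      · rw [if_neg hw, if_neg hw,
          show List.count w (x :: xs) = List.count w xs from by simp [Ne.symm hw]]
    · have haxlt : a < x := lt_of_le_of_ne hax (fun h => hxa h.symm)
      have hxnotin : a ∉ xs := fun hmem => (not_le.mpr haxlt) (hx1 a hmem)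
      rw [show pvStep (c, some a, k) x
          = ((if 1 < k then c.insert a k else c), some x, 1) from by
        simp only [pvStep, Option.getD_some]; rw [if_neg (by simp [hxa])]]
      have hcx' : ∀ y ∈ x :: xs, (if 1 < k then c.insert a k else c).contains y = false := by
        intro y hy
        have hay : a ≠ y := by
          rcases List.mem_cons.mp hy with rfl | hy'
          · exact fun h => hxa h.symm
          · exact fun h => (not_le.mpr haxlt) (by rw [h]; exact hx1 y hy')
        split_ifs
        · rw [PySem.Dict.contains_insert]
          simp [hcl y hy, Ne.symm hay]
        · exact hcl y hy
      rw [ih (if 1 < k then c.insert a k else c) x 1 hs' hx1 le_rfl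
        (hcx' x List.mem_cons_self) (fun y hy => hcx' y (List.mem_cons_of_mem _ hy))]
      rcases eq_or_ne w a with rfl | hwa
      · have hwx : w ≠ x := fun h => hxa h.symm
        rw [if_neg hwx, if_pos rfl,
          show List.count w xs = 0 from List.count_eq_zero.mpr hxnotin,
          show List.count w (x :: xs) = 0 from List.count_eq_zero.mpr (by
            intro hmem
            rcases List.mem_cons.mp hmem with h | h
            · exact hxa h.symm
            · exact hxnotin h)]
        norm_num
        by_cases h1 : (1 : Int) < k
        · rw [if_pos h1, if_pos h1, PySem.Dict.get?_insert_self]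
        · rw [if_neg h1, if_neg h1]
          exact (PySem.Dict.get?_eq_none_iff_contains _ _).mpr hca
      · rw [if_neg hwa]
        rcases eq_or_ne w x with rfl | hwx
        · rw [if_pos rfl, List.count_cons_self,
            show c.get? w = none from
              (PySem.Dict.get?_eq_none_iff_contains _ _).mpr (hcl w List.mem_cons_self)]
          push_cast
          split_ifs <;> first | rfl | (congr 1; omega)
        · rw [if_neg hwx,
            show List.count w (x :: xs) = List.count w xs from by simp [Ne.symm hwx]]
          have hgw : (if 1 < k then c.insert a k else c).get? w = c.get? w := by
            by_cases h1 : (1 : Int) < k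
            · rw [if_pos h1, PySem.Dict.get?_insert_of_ne _ _ hwa]
            · rw [if_neg h1]
          rw [hgw]

lemma counts_get? (v : List Int) (m : Int) (w : List Int) :
    (pvCounts v m).get? w =
      if 1 < ((pvWin v m).count w : Int) then some (((pvWin v m).count w : Int)) else none := by
  unfold pvCounts
  have hp := List.mergeSort_perm (pvWin v m) (fun a b : List Int => decide (a ≤ b))
  rcases hsw : (pvWin v m).mergeSort (fun a b : List Int => decide (a ≤ b)) with _ | ⟨x, t⟩
  · rw [hsw] at hp
    have hnil : pvWin v m = [] := hp.symm.eq_nil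
    rw [hnil]
    simp [pvFlush, PySem.Dict.get?_empty]
  · rw [hsw] at hp
    have hcount : ∀ u : List Int, (pvWin v m).count u = (x :: t).count u :=
      fun u => (hp.count_eq u).symm
    have hpw : (x :: t).Pairwise (fun a b : List Int => a ≤ b) := by
      have h := List.pairwise_mergeSort (le := fun a b : List Int => decide (a ≤ b))
        (fun a b c => by simpa using le_trans) (fun a b => by simpa using le_total a b)
        (pvWin v m)
      rw [hsw] at h
      exact h.imp (by simp)
    rcases List.pairwise_cons.mp hpw with ⟨hx1, hpw'⟩
    rw [List.foldl_cons, show pvStep (PySem.Dict.empty, none, 0) x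
        = (PySem.Dict.empty, some x, 1) from by simp [pvStep],
      runloop t PySem.Dict.empty x 1 hpw' hx1 le_rfl (PySem.Dict.contains_empty x)
        (fun y _ => PySem.Dict.contains_empty y) w]
    rcases eq_or_ne w x with rfl | hw
    · rw [if_pos rfl, hcount w, List.count_cons_self]
      push_cast
      split_ifs <;> first | rfl | (congr 1; omega)
    · rw [if_neg hw, hcount w,
        show List.count w (x :: t) = List.count w t from by simp [hw.symm]]
      split_ifs <;> simp [PySem.Dict.get?_empty]

lemma counts_contains (v : List Int) (m : Int) (w : List Int) :
    (pvCounts v m).contains w = decide (1 < ((pvWin v m).count w : Int)) := by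
  rw [PySem.Dict.contains_eq_isSome_get?, counts_get?]
  by_cases h : 1 < ((pvWin v m).count w : Int) <;> simp [h]

lemma counts_getD (v : List Int) (m : Int) (w : List Int)
    (h : 1 < ((pvWin v m).count w : Int)) :
    (pvCounts v m).getD w 0 = ((pvWin v m).count w : Int) := by
  rw [PySem.Dict.getD_eq_get?_getD, counts_get?, if_pos h]
  rfl

-- the rebuild loop keeps exactly the first occurrences of the kept windows
lemma outloop (c : PySem.Dict (List Int) Int) (l : List (List Int)) :
    (pvOut c l).items =
      ((PySem.Set.ofList l).filter (fun w => c.contains w)).map (fun w => (w, c.getD w 0)) := by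
  induction l using List.reverseRecOn with
  | nil => rfl
  | append_singleton l x ih =>
    have hk : (pvOut c l).keys = (PySem.Set.ofList l).filter (fun w => c.contains w) := by
      simp [PySem.Dict.keys, ih, List.map_map, Function.comp_def]
    have hcont : (pvOut c l).contains x
        = decide (x ∈ (PySem.Set.ofList l).filter (fun w => c.contains w)) := by
      rw [PySem.Dict.contains_eq_decide_mem_keys, hk]
    have hsplit : pvOut c (l ++ [x]) =
        (if c.contains x ∧ ¬ (pvOut c l).contains x
          then (pvOut c l).insert x (c.getD x 0) else pvOut c l) := by
      unfold pvOut; rw [List.foldl_append]; rfl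
    rw [hsplit, PySem.Set.ofList_append_singleton]
    by_cases hcx : c.contains x
    · by_cases hmem : x ∈ PySem.Set.ofList l
      · rw [PySem.Set.add_of_mem hmem]
        have hc1 : (pvOut c l).contains x = true := by
          rw [hcont]; simp [List.mem_filter, hmem, hcx]
        rw [if_neg (by simp [hc1])]; exact ih
      · have hc2 : (pvOut c l).contains x = false := by
          rw [hcont]; simp [List.mem_filter, hmem]
        rw [if_pos ⟨hcx, by simp [hc2]⟩, PySem.Set.add_of_not_mem hmem,
          PySem.Dict.items_insert_of_not_contains (h := hc2), List.filter_append, ih]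
        simp [hcx]
    · rw [if_neg (by simp [hcx]), ih]
      by_cases hmem : x ∈ PySem.Set.ofList l
      · rw [PySem.Set.add_of_mem hmem]
      · rw [PySem.Set.add_of_not_mem hmem, List.filter_append]
        simp [hcx]

-- ===== VERDICT (by name: the statement is the Claim_ definition above) =====
theorem found_pattern_spec : Claim_equal_found_pattern := by
  intro v m _
  show found_pattern v m = found_pattern_alt v m
  rw [a_char, alt_eq, outloop]
  simp only [counts_contains]
  refine List.map_congr_left (fun w hw => ?_)
  rw [List.mem_filter] at hw
  rw [counts_getD v m w (by simpa using hw.2)]
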